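-- pv_equiv track=rewrite | github.com/pypi-data/pypi-mirror-140 | packages/eshqol/eshqol-0.0.2-py3-none-any.whl/eshqol/__init__.py | divide_two_integers
-- ===== SOURCE A (Python) =====
-- def divide_two_integers(dividend: int, divisor: int):
--     x = abs(dividend)
--     y = abs(divisor)
--     quotient = 0
--     while x >= y:
--         x = x - y
--         quotient = quotient + 1
--     return quotient
-- ===== SOURCE B (Python) =====
-- def divide_two_integers(dividend, divisor):
--     x = abs(dividend)
--     y = abs(divisor)
--     quotient = 0
--     while x >= y:
--         temp = y
--         m = 1
--         while x >= temp * 2: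
--             temp = temp * 2
--             m = m * 2
--         x = x - temp
--         quotient = quotient + m
--     return quotient
-- ===== Notes on version B (the rewrite author's own statement) =====
-- stated objective: faster
-- what changed: replaces the one-at-a-time repeated-subtraction loop by a binary (doubling) long-division loop that subtracts the largest shifted multiple of the divisor at each step
import Mathlib
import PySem

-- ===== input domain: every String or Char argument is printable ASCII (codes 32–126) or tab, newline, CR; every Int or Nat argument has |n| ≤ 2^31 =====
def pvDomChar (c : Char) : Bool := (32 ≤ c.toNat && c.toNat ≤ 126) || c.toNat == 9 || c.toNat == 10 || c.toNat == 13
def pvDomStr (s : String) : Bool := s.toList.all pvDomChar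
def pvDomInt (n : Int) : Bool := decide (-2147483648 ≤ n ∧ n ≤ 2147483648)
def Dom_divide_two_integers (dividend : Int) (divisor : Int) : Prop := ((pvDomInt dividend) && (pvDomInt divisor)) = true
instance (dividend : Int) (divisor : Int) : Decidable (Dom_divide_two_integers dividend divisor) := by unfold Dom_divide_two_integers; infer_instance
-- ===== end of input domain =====

-- B replaces A's one-step repeated subtraction by binary (doubling) long division: faster, same quotient.
-- Pre_ excludes divisor = 0, on which Python A (and B) loop forever and return nothing.


-- ===== PORT A =====
-- A's while loop: subtract y once per iteration, count.  The fuel (x + 1 at the call,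
-- enough for every y > 0) is a totality guard only: for y = 0 Python loops forever,
-- and Pre_ excludes that input.
def pvALoop : Nat → Nat → Nat → Nat → Nat
  | 0, _, _, q => q
  | fuel + 1, y, x, q => if y ≤ x then pvALoop fuel y (x - y) (q + 1) else q

def divide_two_integers (dividend : Int) (divisor : Int) : Int :=
  (pvALoop (dividend.natAbs + 1) divisor.natAbs dividend.natAbs 0 : Int)

-- ===== PORT B =====
-- B's inner doubling loop: grow temp (a multiple of y) and m while x ≥ 2*temp.
-- Fuel x suffices for every temp ≥ 1 (temp at least doubles each step); totality guard only.
def pvChunk : Nat → Nat → Nat → Nat → Nat × Nat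
  | 0, _, temp, m => (temp, m)
  | fuel + 1, x, temp, m => if temp * 2 ≤ x then pvChunk fuel x (temp * 2) (m * 2) else (temp, m)

-- B's outer loop: subtract the found chunk, add its multiplier.  Fuel x + 1 suffices for y > 0.
def pvBLoop : Nat → Nat → Nat → Nat → Nat
  | 0, _, _, q => q
  | fuel + 1, y, x, q =>
    if y ≤ x then
      let c := pvChunk x x y 1
      pvBLoop fuel y (x - c.1) (q + c.2)
    else q

def divide_two_integers_alt (dividend : Int) (divisor : Int) : Int :=
  (pvBLoop (dividend.natAbs + 1) divisor.natAbs dividend.natAbs 0 : Int)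

-- ===== PRECONDITION & SPEC =====
-- Pre_ excludes divisor = 0: there Python A never returns (its while loop runs forever).
def Pre_divide_two_integers (dividend : Int) (divisor : Int) : Prop := divisor ≠ 0
instance (dividend : Int) (divisor : Int) : Decidable (Pre_divide_two_integers dividend divisor) := by unfold Pre_divide_two_integers; infer_instance
def pvWitness_divide_two_integers : Int × Int := (1234, -7)

def Spec_divide_two_integers (dividend : Int) (divisor : Int) (out : Int) : Prop := out = divide_two_integers_alt dividend divisor
instance (dividend : Int) (divisor : Int) (out : Int) : Decidable (Spec_divide_two_integers dividend divisor out) := by unfold Spec_divide_two_integers; infer_instance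

-- ===== CLAIM (what is proved, stated in full; the proofs are below) =====
def Claim_equal_divide_two_integers : Prop := ∀ (dividend : Int) (divisor : Int), Dom_divide_two_integers dividend divisor → Pre_divide_two_integers dividend divisor → Spec_divide_two_integers dividend divisor (divide_two_integers dividend divisor)

-- ===== LEMMAS AND PROOFS =====

-- A's loop computes q + x / y (for 0 < y and enough fuel).
theorem pvALoop_eq (y : Nat) (hy : 0 < y) :
    ∀ fuel x q, x < fuel → pvALoop fuel y x q = q + x / y := by
  intro fuel
  induction fuel with
  | zero => intro x q h; omega
  | succ f ih =>
    intro x q h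
    unfold pvALoop
    split
    · next hle =>
      rw [ih (x - y) (q + 1) (by omega)]
      have : x / y = (x - y) / y + 1 := Nat.div_eq_sub_div hy hle
      omega
    · next hle =>
      rw [Nat.div_eq_of_lt (by omega)]
      omega

-- The doubling search preserves 'temp = y * m', m ≥ 1 and temp ≤ x (any fuel).
theorem pvChunk_inv (y : Nat) :
    ∀ fuel x temp m, temp = y * m → 0 < m → temp ≤ x →
      (pvChunk fuel x temp m).1 = y * (pvChunk fuel x temp m).2 ∧
      0 < (pvChunk fuel x temp m).2 ∧ (pvChunk fuel x temp m).1 ≤ x := by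
  intro fuel
  induction fuel with
  | zero => intro x temp m h1 h2 h3; exact ⟨h1, h2, h3⟩
  | succ f ih =>
    intro x temp m h1 h2 h3
    unfold pvChunk
    split
    · next hle => exact ih x (temp * 2) (m * 2) (by rw [h1]; ring) (by omega) (by omega)
    · exact ⟨h1, h2, h3⟩

-- B's loop also computes q + x / y (for 0 < y and enough fuel).
theorem pvBLoop_eq (y : Nat) (hy : 0 < y) :
    ∀ fuel x q, x < fuel → pvBLoop fuel y x q = q + x / y := by
  intro fuel
  induction fuel with
  | zero => intro x q h; omega
  | succ f ih =>
    intro x q h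
    unfold pvBLoop
    split
    · next hle =>
      have hinv := pvChunk_inv y x x y 1 (by omega) (by omega) hle
      set c := pvChunk x x y 1 with hc
      have h1 : c.1 = y * c.2 := hinv.1
      have hyc : y * c.2 ≤ x := by rw [← h1]; exact hinv.2.2
      have hcpos : 0 < c.1 := by rw [h1]; exact Nat.mul_pos hy hinv.2.1
      rw [ih (x - c.1) (q + c.2) (by omega), h1]
      have hcy : c.2 ≤ x / y := (Nat.le_div_iff_mul_le hy).mpr (by rw [mul_comm]; exact hyc)
      have hsub : (x - y * c.2) / y = x / y - c.2 := Nat.sub_mul_div x y c.2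
      rw [hsub]
      omega
    · next hle =>
      rw [Nat.div_eq_of_lt (by omega)]
      omega

-- ===== VERDICT (by name: the statement is the Claim_ definition above) =====
theorem divide_two_integers_spec : Claim_equal_divide_two_integers := by
  intro dividend divisor _ hpre
  unfold Spec_divide_two_integers divide_two_integers divide_two_integers_alt
  have hy : 0 < divisor.natAbs := Int.natAbs_pos.mpr hpre
  rw [pvALoop_eq _ hy _ _ _ (by omega), pvBLoop_eq _ hy _ _ _ (by omega)]
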